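-- pv_equiv track=rewrite | github.com/sergikdropz/sergik-ableton-cli | sergik_ml/utils/midi.py | midi_to_note_name
-- ===== SOURCE A (Python) =====
-- from typing import List, Tuple, Optional
--
-- NOTE_MAP = {
--     "C": 0, "C#": 1, "Db": 1,
--     "D": 2, "D#": 3, "Eb": 3,
--     "E": 4,
--     "F": 5, "F#": 6, "Gb": 6,
--     "G": 7, "G#": 8, "Ab": 8,
--     "A": 9, "A#": 10, "Bb": 10,
--     "B": 11,
-- }
--
-- def midi_to_note_name(midi_number: int) -> Tuple[str, int]:
--     """
--     Convert MIDI number to note name and octave.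
--
--     Args:
--         midi_number: MIDI note number (0-127)
--
--     Returns:
--         Tuple of (note_name, octave)
--
--     Examples:
--         >>> midi_to_note_name(60)
--         ('C', 4)
--         >>> midi_to_note_name(61)
--         ('C#', 4)
--     """
--     if not 0 <= midi_number <= 127:
--         raise ValueError(f"MIDI number out of range: {midi_number}")
--
--     octave = midi_number // 12
--     note_value = midi_number % 12
--
--     # Find note name
--     for note, value in NOTE_MAP.items():
--         if value == note_value:
--             return (note, octave)
--
--     raise ValueError(f"Invalid MIDI number: {midi_number}")
-- ===== SOURCE B (Python) =====
-- NOTE_NAMES = ["C", "C#", "D", "D#", "E", "F", "F#", "G", "G#", "A", "A#", "B"]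
--
-- def midi_to_note_name(midi_number):
--     if not 0 <= midi_number <= 127:
--         raise ValueError(f"MIDI number out of range: {midi_number}")
--     return (NOTE_NAMES[midi_number % 12], midi_number // 12)
-- ===== Notes on version B (the rewrite author's own statement) =====
-- stated objective: simpler
-- what changed: Replaces the dict NOTE_MAP and its linear first-match scan with a fixed 12-element sharp-spelled name table indexed directly by midi_number % 12, removing the loop entirely.
import Mathlib
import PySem

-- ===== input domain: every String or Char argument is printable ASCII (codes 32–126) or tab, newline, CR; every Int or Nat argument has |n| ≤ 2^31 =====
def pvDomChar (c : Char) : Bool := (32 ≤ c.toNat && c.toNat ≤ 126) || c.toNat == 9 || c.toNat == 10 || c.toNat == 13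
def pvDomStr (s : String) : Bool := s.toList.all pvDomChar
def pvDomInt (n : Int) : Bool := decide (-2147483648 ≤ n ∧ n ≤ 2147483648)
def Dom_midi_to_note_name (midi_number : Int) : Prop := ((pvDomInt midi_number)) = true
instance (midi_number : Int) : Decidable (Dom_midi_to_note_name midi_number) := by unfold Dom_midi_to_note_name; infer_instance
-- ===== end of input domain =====

-- B replaces A's dict scan with direct indexing into a fixed 12-name table (simpler, no loop);
-- equivalence is about the RETURN value on 0..127 (outside, both Pythons raise ValueError).

-- ===== PORT A =====
def pvNoteMap : List (String × Int) :=
  [("C", 0), ("C#", 1), ("Db", 1),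
   ("D", 2), ("D#", 3), ("Eb", 3),
   ("E", 4),
   ("F", 5), ("F#", 6), ("Gb", 6),
   ("G", 7), ("G#", 8), ("Ab", 8),
   ("A", 9), ("A#", 10), ("Bb", 10),
   ("B", 11)]

-- the 'for note, value in NOTE_MAP.items(): if value == note_value: return …' scan
def pvScan (items : List (String × Int)) (note_value octave : Int) : String × Int :=
  match items with
  | [] => ("", 0)  -- the trailing 'raise ValueError' (unreachable for 0 ≤ note_value < 12); excluded by Pre_
  | (note, value) :: rest =>
      if value = note_value then (note, octave) else pvScan rest note_value octave

def midi_to_note_name (midi_number : Int) : String × Int :=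
  if ¬ (0 ≤ midi_number ∧ midi_number ≤ 127) then ("", 0)  -- 'raise ValueError'; excluded by Pre_
  else
    pvScan pvNoteMap (PySem.Int.mod midi_number 12) (PySem.Int.floordiv midi_number 12)

-- ===== PORT B =====
def pvNoteNames : List String :=
  ["C", "C#", "D", "D#", "E", "F", "F#", "G", "G#", "A", "A#", "B"]

def midi_to_note_name_alt (midi_number : Int) : String × Int :=
  if ¬ (0 ≤ midi_number ∧ midi_number ≤ 127) then ("", 0)  -- 'raise ValueError'; excluded by Pre_
  else
    ((PySem.List.pyGet? pvNoteNames (PySem.Int.mod midi_number 12)).getD "",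
     PySem.Int.floordiv midi_number 12)

-- ===== PRECONDITION & SPEC =====
-- Pre_ excludes exactly the inputs outside 0..127, on which the Python A raises ValueError.
def Pre_midi_to_note_name (midi_number : Int) : Prop := 0 ≤ midi_number ∧ midi_number ≤ 127
instance (midi_number : Int) : Decidable (Pre_midi_to_note_name midi_number) := by
  unfold Pre_midi_to_note_name; infer_instance

def pvWitness_midi_to_note_name : Int := 60

def Spec_midi_to_note_name (midi_number : Int) (out : String × Int) : Prop :=
  out = midi_to_note_name_alt midi_number
instance (midi_number : Int) (out : String × Int) : Decidable (Spec_midi_to_note_name midi_number out) := by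
  unfold Spec_midi_to_note_name; infer_instance

-- ===== CLAIM (what is proved, stated in full; the proofs are below) =====
def Claim_equal_midi_to_note_name : Prop :=
  ∀ (midi_number : Int), Dom_midi_to_note_name midi_number →
    Pre_midi_to_note_name midi_number →
    Spec_midi_to_note_name midi_number (midi_to_note_name midi_number)

-- ===== LEMMAS AND PROOFS =====

-- both sides depend on midi_number only through r = midi_number % 12 and the octave
lemma scan_eq_index (r : Int) (hr0 : 0 ≤ r) (hr : r < 12) (oct : Int) :
    pvScan pvNoteMap r oct = ((PySem.List.pyGet? pvNoteNames r).getD "", oct) := by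
  interval_cases r <;> rfl

-- ===== VERDICT (by name: the statement is the Claim_ definition above) =====
theorem midi_to_note_name_spec : Claim_equal_midi_to_note_name := by
  intro n _ hpre
  unfold Spec_midi_to_note_name midi_to_note_name midi_to_note_name_alt
  rw [if_neg (by simpa using hpre), if_neg (by simpa using hpre)]
  have h12 : (12 : Int) ≠ 0 := by norm_num
  have hm : PySem.Int.mod n 12 = n % 12 := by
    simp [PySem.Int.mod, Int.fmod_eq_emod]
  exact hm ▸ scan_eq_index (n % 12) (Int.emod_nonneg n h12) (by omega) _
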